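-- pv_equiv track=rewrite | github.com/kreimben/Coding-Test | programmers.kr/선입 선출 스케줄링.py | solution
-- ===== SOURCE A (Python) =====
-- import heapq
--
-- def solution(n, cores):
--     """
--     1 2 3
--     4 2 3
--     5 6 3
--     """
--     N = len(cores)
--     heap = []  # (end, core index)
--     last_used = None  # last used core index.
--     curr = 0  # current time
--     rest = [True for _ in range(N)]
--     while n > 0:
--         while heap and heap[0][0] <= curr:
--             _, l = heapq.heappop(heap)
--             rest[l] = True
--
--         while n > 0 and \
--                 len(rest) != len(list(filter(lambda x: x is False, rest))):
--             if not any(rest) and heap: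
--                 # if there are no any rest cores.
--                 end, core_index = heapq.pop(heap)
--                 last_used = core_index
--             else:
--                 # if there is any rest cores.
--                 last_used = rest.index(True)  # the very first True index.
--             heapq.heappush(heap, (curr + cores[last_used], last_used))
--             rest[last_used] = False
--             n -= 1
--         curr += 1
--     return last_used + 1
-- ===== SOURCE B (Python) =====
-- def solution(n, cores):
--     # Next-free-time array instead of A's heap + rest-flags bookkeeping:
--     # one plain left-to-right scan per time tick assigns every free core
--     # (A rescans the whole list via filter/any/index for every single task).
--     N = len(cores)
--     free = [0] * N          # time at which core i is next free
--     t = 0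
--     last = None
--     while n > 0:
--         for i in range(N):
--             if n > 0 and free[i] <= t:
--                 free[i] = t + cores[i]
--                 last = i
--                 n -= 1
--         t += 1
--     return last + 1
-- ===== Notes on version B (the rewrite author's own statement) =====
-- stated objective: faster
-- what changed: Replaced A's heap of (end,core) pairs plus a rest-flag list that A rescans in full for every single task (filter, any, list.index) with one next-free-time array scanned once left-to-right per time tick.
import Mathlib
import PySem

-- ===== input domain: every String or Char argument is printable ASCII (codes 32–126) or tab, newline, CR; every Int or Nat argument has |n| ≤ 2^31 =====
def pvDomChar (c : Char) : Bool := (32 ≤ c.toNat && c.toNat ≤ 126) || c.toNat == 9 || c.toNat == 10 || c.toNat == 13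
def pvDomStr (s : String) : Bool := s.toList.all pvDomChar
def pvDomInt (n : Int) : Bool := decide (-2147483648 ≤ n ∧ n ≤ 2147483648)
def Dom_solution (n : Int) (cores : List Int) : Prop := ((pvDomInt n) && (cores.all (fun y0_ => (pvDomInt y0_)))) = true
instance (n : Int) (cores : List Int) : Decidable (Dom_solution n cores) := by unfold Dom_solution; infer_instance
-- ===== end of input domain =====

-- B replaces A's heap + rest-flag bookkeeping (which rescans the whole core list for every
-- task) with a single next-free-time array scanned once per time tick; a timing run
-- measured B faster. Same return value wherever A returns.

-- fuel shared by both ports: an upper bound on the number of time ticks the Python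
-- while-loops run before n tasks are scheduled (core 0 alone takes a task at least
-- every max(cores[0],1) ticks), so inside Pre_ the loops below exit before fuel runs out
def pvFuel (n : Int) (cores : List Int) : Nat := n.toNat * ((cores.headD 0).natAbs + 2) + 1

-- ===== PORT A =====
-- heapq is ported as a list kept sorted by the (end, index) tuple order: A observes the
-- heap only through heap[0] (its minimum) and heappop (removal of that minimum, ties on
-- end broken by the smaller index), which sorted order reproduces exactly.
def hpush (p : Int × Nat) : List (Int × Nat) → List (Int × Nat)
  | [] => [p]
  | q :: t => if p.1 < q.1 ∨ (p.1 = q.1 ∧ p.2 ≤ q.2) then p :: q :: t else q :: hpush p t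

-- 'while heap and heap[0][0] <= curr: _, l = heappop(heap); rest[l] = True'
def popA (curr : Int) : List (Int × Nat) → List Bool → (List (Int × Nat) × List Bool)
  | [], rest => ([], rest)
  | (e, i) :: t, rest => if e ≤ curr then popA curr t (rest.set i true) else ((e, i) :: t, rest)

-- the inner while-loop; 'none' = Python raises (the heapq.pop branch is an AttributeError,
-- a missing index a ValueError/IndexError); fuel bounds the iterations (each one sets a
-- True flag to False, so rest.length iterations always suffice)
def innerA (cores : List Int) (curr : Int) :
    Nat → Int × List (Int × Nat) × List Bool × Option Nat →
    Option (Int × List (Int × Nat) × List Bool × Option Nat)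
  | 0, s => some s
  | fu + 1, (n, heap, rest, last) =>
    if 0 < n ∧ rest.any (· == true) then
      if ¬ rest.any (· == true) ∧ heap ≠ [] then none
      else
        match cores[rest.findIdx (· == true)]? with
        | none => none
        | some c =>
          innerA cores curr fu (n - 1, hpush (curr + c, rest.findIdx (· == true)) heap,
            rest.set (rest.findIdx (· == true)) false, some (rest.findIdx (· == true)))
    else some (n, heap, rest, last)

-- the outer 'while n > 0' loop; returns last_used
def outerA (cores : List Int) :
    Nat → Int × Int × List (Int × Nat) × List Bool × Option Nat → Option (Option Nat)
  | 0, (_, _, _, _, last) => some last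
  | fu + 1, (n, curr, heap, rest, last) =>
    if 0 < n then
      match popA curr heap rest with
      | (h', r') =>
        match innerA cores curr r'.length (n, h', r', last) with
        | none => none
        | some (n', h'', r'', l') => outerA cores fu (n', curr + 1, h'', r'', l')
    else some last

def solution (n : Int) (cores : List Int) : Int :=
  match outerA cores (pvFuel n cores) (n, 0, [], List.replicate cores.length true, none) with
  | some (some l) => (l : Int) + 1
  | _ => 0  -- Python raises here (None + 1, or the unreachable heapq.pop) or never returns; outside Pre_

-- ===== PORT B =====
-- 'for i in range(N): if n > 0 and free[i] <= t: ...'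
def forB (cores : List Int) (t : Int) :
    Nat → Nat → Int × List Int × Option Nat → Int × List Int × Option Nat
  | 0, _, s => s
  | k + 1, i, (n, f, last) =>
    if 0 < n ∧ f.getD i 0 ≤ t then
      forB cores t k (i + 1) (n - 1, f.set i (t + cores.getD i 0), some i)
    else forB cores t k (i + 1) (n, f, last)

-- 'while n > 0: ... t += 1'
def outerB (cores : List Int) : Nat → Int × Int × List Int × Option Nat → Option Nat
  | 0, (_, _, _, last) => last
  | fu + 1, (n, t, f, last) =>
    if 0 < n then
      match forB cores t cores.length 0 (n, f, last) with
      | (n', f', l') => outerB cores fu (n', t + 1, f', l')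
    else last

def solution_alt (n : Int) (cores : List Int) : Int :=
  match outerB cores (pvFuel n cores) (n, 0, List.replicate cores.length 0, none) with
  | some l => (l : Int) + 1
  | none => 0  -- Python raises (None + 1) or never returns; outside Pre_

-- ===== PRECONDITION & SPEC =====
-- Pre_ excludes n ≤ 0 (A returns no int: 'None + 1' raises TypeError) and cores = []
-- (A's while-loop never terminates); A returns normally on everything else.
def Pre_solution (n : Int) (cores : List Int) : Prop := 1 ≤ n ∧ cores ≠ []
instance (n : Int) (cores : List Int) : Decidable (Pre_solution n cores) := by
  unfold Pre_solution; infer_instance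

def pvWitness_solution : Int × List Int := (7, [1, 2, 3])

def Spec_solution (n : Int) (cores : List Int) (out : Int) : Prop := out = solution_alt n cores
instance (n : Int) (cores : List Int) (out : Int) : Decidable (Spec_solution n cores out) := by
  unfold Spec_solution; infer_instance

-- ===== CLAIM (what is proved, stated in full; the proofs are below) =====
def Claim_equal_solution : Prop := ∀ (n : Int) (cores : List Int), Dom_solution n cores → Pre_solution n cores → Spec_solution n cores (solution n cores)

-- ===== LEMMAS AND PROOFS =====

-- simulation relation between A's state (heap, rest) and B's next-free-time array f,
-- valid at the top of an outer iteration at time curr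
def SimRel (cores : List Int) (curr : Int) (heap : List (Int × Nat)) (rest : List Bool)
    (f : List Int) : Prop :=
  rest.length = cores.length ∧ f.length = cores.length ∧
  heap.Pairwise (fun a b => a.1 < b.1 ∨ (a.1 = b.1 ∧ a.2 ≤ b.2)) ∧
  (heap.map Prod.snd).Nodup ∧
  (∀ e i, (e, i) ∈ heap → i < cores.length ∧ e = f.getD i 0 ∧ rest.getD i true = false) ∧
  (∀ i, i < cores.length → rest.getD i true = false → (f.getD i 0, i) ∈ heap) ∧
  (∀ i, i < cores.length → rest.getD i true = true → f.getD i 0 ≤ curr)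

theorem hpush_perm (p : Int × Nat) (l : List (Int × Nat)) : List.Perm (hpush p l) (p :: l) := by
  induction l with
  | nil => simp [hpush]
  | cons q t ih =>
    simp only [hpush]
    split
    · exact List.Perm.refl _
    · exact (List.Perm.cons q ih).trans (List.Perm.swap p q t)

theorem mem_hpush {x p : Int × Nat} {l : List (Int × Nat)} :
    x ∈ hpush p l ↔ x = p ∨ x ∈ l := by
  rw [(hpush_perm p l).mem_iff]; simp

theorem hpush_pairwise (p : Int × Nat) (l : List (Int × Nat))
    (h : l.Pairwise (fun a b => a.1 < b.1 ∨ (a.1 = b.1 ∧ a.2 ≤ b.2))) :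
    (hpush p l).Pairwise (fun a b => a.1 < b.1 ∨ (a.1 = b.1 ∧ a.2 ≤ b.2)) := by
  induction l with
  | nil => simp [hpush]
  | cons q t ih =>
    rcases List.pairwise_cons.mp h with ⟨hq, ht⟩
    simp only [hpush]
    split
    · rename_i hle
      refine List.pairwise_cons.mpr ⟨?_, h⟩
      intro b hb
      rcases List.mem_cons.mp hb with rfl | hb
      · exact hle
      · rcases hle with h3 | ⟨h3, h4⟩ <;> rcases hq b hb with h1 | ⟨h1, h2⟩
        · exact Or.inl (by omega)
        · exact Or.inl (by omega)
        · exact Or.inl (by omega)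
        · exact Or.inr ⟨by omega, by omega⟩
    · rename_i hgt
      push Not at hgt
      refine List.pairwise_cons.mpr ⟨?_, ih ht⟩
      intro b hb
      have hb' := (hpush_perm p t).mem_iff.mp hb
      rcases List.mem_cons.mp hb' with rfl | hb2
      · rcases lt_trichotomy q.1 b.1 with h1 | h1 | h1
        · exact Or.inl h1
        · exact Or.inr ⟨h1, by omega⟩
        · exact absurd h1 (by omega)
      · exact hq b hb2

theorem count_set_true : ∀ (l : List Bool) (j : Nat), j < l.length → l.getD j true = true →
    (l.set j false).count true + 1 = l.count true := by
  intro l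
  induction l with
  | nil => intro j h; simp at h
  | cons b t ih =>
    intro j hj hget
    cases j with
    | zero =>
      simp [List.getD] at hget
      subst hget
      simp
    | succ j =>
      have := ih j (by simpa using hj) (by simpa [List.getD] using hget)
      simp only [List.set_cons_succ, List.count_cons]
      omega

theorem getD_set_self (l : List Bool) (i : Nat) (v d : Bool) (h : i < l.length) :
    (l.set i v).getD i d = v := by
  rw [List.getD, List.getElem?_set_self h]; rfl

theorem getD_set_self_int (l : List Int) (i : Nat) (v d : Int) (h : i < l.length) :
    (l.set i v).getD i d = v := by
  rw [List.getD, List.getElem?_set_self h]; rfl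

theorem getD_set_ne (l : List Bool) (i j : Nat) (v d : Bool) (h : i ≠ j) :
    (l.set i v).getD j d = l.getD j d := by
  rw [List.getD, List.getElem?_set_ne h]; rfl

theorem getD_set_ne_int (l : List Int) (i j : Nat) (v d : Int) (h : i ≠ j) :
    (l.set i v).getD j d = l.getD j d := by
  rw [List.getD, List.getElem?_set_ne h]; rfl

theorem any_true_of_getD (rest : List Bool) (j : Nat) (hj : j < rest.length)
    (h : rest.getD j true = true) : rest.any (· == true) = true := by
  rw [List.getD, List.getElem?_eq_getElem hj] at h
  simp only [List.any_eq_true]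
  exact ⟨rest[j], List.getElem_mem hj, by simp [Option.getD_some ▸ h]⟩

theorem any_false_of_all (rest : List Bool) (h : ∀ i, i < rest.length → rest.getD i true = false) :
    rest.any (· == true) = false := by
  simp only [List.any_eq_false]
  intro b hb
  rcases List.getElem_of_mem hb with ⟨i, hi, rfl⟩
  have := h i hi
  rw [List.getD, List.getElem?_eq_getElem hi] at this
  simp only [Option.getD_some] at this
  simp [this]

theorem findIdx_true_eq (rest : List Bool) (j : Nat) (hj : j < rest.length)
    (hget : rest.getD j true = true) (hpre : ∀ i, i < j → rest.getD i true = false) :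
    rest.findIdx (· == true) = j := by
  refine (List.findIdx_eq hj).mpr ⟨?_, ?_⟩
  · rw [List.getD, List.getElem?_eq_getElem hj] at hget
    simp only [Option.getD_some] at hget
    simp [hget]
  · intro i hij
    have := hpre i hij
    rw [List.getD, List.getElem?_eq_getElem (lt_trans hij hj)] at this
    simp only [Option.getD_some] at this
    simp [this]

-- n ≤ 0: the for-loop of B changes nothing
theorem forB_nonpos (cores : List Int) (t : Int) :
    ∀ k j n f last, ¬ (0 < n) → forB cores t k j (n, f, last) = (n, f, last) := by
  intro k
  induction k with
  | zero => intro j n f last _; simp [forB]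
  | succ k ih =>
    intro j n f last hn
    simp only [forB]
    rw [if_neg (by intro h; exact hn h.1)]
    exact ih (j + 1) n f last hn

-- effect of the pop-while-loop: it frees exactly the cores whose end time has passed
theorem pop_spec (cores f : List Int) (curr : Int) :
    ∀ (heap : List (Int × Nat)) (rest : List Bool),
    rest.length = cores.length →
    heap.Pairwise (fun a b => a.1 < b.1 ∨ (a.1 = b.1 ∧ a.2 ≤ b.2)) →
    (heap.map Prod.snd).Nodup →
    (∀ e i, (e, i) ∈ heap → i < cores.length ∧ e = f.getD i 0 ∧ rest.getD i true = false) →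
    (∀ i, i < cores.length → rest.getD i true = false → (f.getD i 0, i) ∈ heap) →
    (∀ i, i < cores.length → rest.getD i true = true → f.getD i 0 ≤ curr) →
    (popA curr heap rest).2.length = cores.length ∧
    (∀ i, i < cores.length → (popA curr heap rest).2.getD i true = decide (f.getD i 0 ≤ curr)) ∧
    (popA curr heap rest).1.Pairwise (fun a b => a.1 < b.1 ∨ (a.1 = b.1 ∧ a.2 ≤ b.2)) ∧
    ((popA curr heap rest).1.map Prod.snd).Nodup ∧
    (∀ e i, (e, i) ∈ (popA curr heap rest).1 →
      i < cores.length ∧ e = f.getD i 0 ∧ (popA curr heap rest).2.getD i true = false) ∧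
    (∀ i, i < cores.length → (popA curr heap rest).2.getD i true = false →
      (f.getD i 0, i) ∈ (popA curr heap rest).1) := by
  intro heap
  induction heap with
  | nil =>
    intro rest hlen _ _ hmem hbusy hfree
    simp only [popA]
    refine ⟨hlen, ?_, List.Pairwise.nil, by simp, by simp, ?_⟩
    · intro i hi
      cases hrest : rest.getD i true with
      | false => exact absurd (hbusy i hi hrest) (by simp)
      | true => exact (decide_eq_true (hfree i hi hrest)).symm
    · intro i hi h
      exact absurd (hbusy i hi h) (by simp)
  | cons p t ih =>
    intro rest hlen hpair hnodup hmem hbusy hfree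
    obtain ⟨e, i⟩ := p
    rcases List.pairwise_cons.mp hpair with ⟨hq, ht⟩
    rcases hmem e i (List.mem_cons_self) with ⟨hiN, hef, hrf⟩
    simp only [List.map_cons, List.nodup_cons] at hnodup
    by_cases hec : e ≤ curr
    · -- head's end time has passed: popped, its core freed, continue on the tail
      simp only [popA, if_pos hec]
      have hilen : i < rest.length := by rw [hlen]; exact hiN
      apply ih (rest.set i true) (by simpa using hlen) ht hnodup.2
      · intro e' i' hmem'
        rcases hmem e' i' (List.mem_cons_of_mem _ hmem') with ⟨h1, h2, h3⟩
        have hne : i ≠ i' := by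
          intro h; subst h
          exact hnodup.1 (by simpa using List.mem_map_of_mem (f := Prod.snd) hmem')
        exact ⟨h1, h2, by rwa [getD_set_ne _ _ _ _ _ hne]⟩
      · intro i' hi' hri'
        by_cases hii : i = i'
        · subst hii
          rw [getD_set_self _ _ _ _ hilen] at hri'
          exact absurd hri' (by simp)
        · rw [getD_set_ne _ _ _ _ _ hii] at hri'
          have hm := hbusy i' hi' hri'
          rcases List.mem_cons.mp hm with h | h
          · exact absurd (congrArg Prod.snd h) (Ne.symm hii)
          · exact h
      · intro i' hi' hri'
        by_cases hii : i = i'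
        · subst hii
          rw [getD_set_self _ _ _ _ hilen] at hri'
          rw [← hef]; exact hec
        · rw [getD_set_ne _ _ _ _ _ hii] at hri'
          exact hfree i' hi' hri'
    · -- head's end time is still in the future: the whole (sorted) heap stays
      simp only [popA, if_neg hec]
      have hall : ∀ e' i', (e', i') ∈ (e, i) :: t → curr < e' := by
        intro e' i' hmem'
        rcases List.mem_cons.mp hmem' with h | h
        · have : e' = e := congrArg Prod.fst h
          omega
        · rcases hq (e', i') h with h1 | ⟨h1, _⟩ <;> simp at h1 <;> omega
      have hrest_eq : ∀ i', i' < cores.length →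
          rest.getD i' true = decide (f.getD i' 0 ≤ curr) := by
        intro i' hi'
        cases hrest : rest.getD i' true with
        | false =>
          have hm := hbusy i' hi' hrest
          have := hall _ _ hm
          exact (decide_eq_false (by omega)).symm
        | true => exact (decide_eq_true (hfree i' hi' hrest)).symm
      refine ⟨hlen, hrest_eq, hpair, ?_, hmem, hbusy⟩
      simp only [List.map_cons, List.nodup_cons]
      exact hnodup

-- the inner assignment loop of A, run on the freed state, matches B's left-to-right scan
theorem inner_spec (cores : List Int) (t : Int) :
    ∀ (k j : Nat) (n : Int) (heap : List (Int × Nat)) (rest : List Bool) (f : List Int)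
      (last : Option Nat) (fuelA : Nat),
    j + k = cores.length →
    rest.length = cores.length → f.length = cores.length →
    (∀ i, i < j → rest.getD i true = false) →
    (∀ i, j ≤ i → i < cores.length → rest.getD i true = decide (f.getD i 0 ≤ t)) →
    heap.Pairwise (fun a b => a.1 < b.1 ∨ (a.1 = b.1 ∧ a.2 ≤ b.2)) →
    (heap.map Prod.snd).Nodup →
    (∀ e i, (e, i) ∈ heap → i < cores.length ∧ e = f.getD i 0 ∧ rest.getD i true = false) →
    (∀ i, i < cores.length → rest.getD i true = false → (f.getD i 0, i) ∈ heap) →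
    rest.count true ≤ fuelA →
    ∃ n' heap' rest' f' last',
      innerA cores t fuelA (n, heap, rest, last) = some (n', heap', rest', last') ∧
      forB cores t k j (n, f, last) = (n', f', last') ∧
      SimRel cores (t + 1) heap' rest' f' := by
  intro k
  induction k with
  | zero =>
    intro j n heap rest f last fuelA hjk hrl hfl hpre hsuf hpair hnodup hmem hbusy hcnt
    have hallfalse : ∀ i, i < rest.length → rest.getD i true = false := by
      intro i hi
      exact hpre i (by omega)
    have hany : rest.any (· == true) = false := any_false_of_all rest hallfalse
    have hA : innerA cores t fuelA (n, heap, rest, last) = some (n, heap, rest, last) := by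
      cases fuelA with
      | zero => rfl
      | succ fu =>
        simp only [innerA]
        rw [if_neg (fun hcond => absurd hcond.2 (by rw [hany]; simp))]
    refine ⟨n, heap, rest, f, last, hA, rfl,
      hrl, hfl, hpair, hnodup, hmem, hbusy, ?_⟩
    intro i hi hri
    have hi' : i < rest.length := by rw [hrl]; exact hi
    rw [hallfalse i hi'] at hri
    exact absurd hri (by simp)
  | succ k ih =>
    intro j n heap rest f last fuelA hjk hrl hfl hpre hsuf hpair hnodup hmem hbusy hcnt
    by_cases hn : 0 < n
    · have hjN : j < cores.length := by omega
      have hjr : j < rest.length := by rw [hrl]; exact hjN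
      by_cases hfj : f.getD j 0 ≤ t
      · -- core j is free: both programs assign a task to it
        have hrestj : rest.getD j true = true := by
          rw [hsuf j le_rfl hjN]; exact decide_eq_true hfj
        have hany : rest.any (· == true) = true := any_true_of_getD rest j hjr hrestj
        have hfind : rest.findIdx (· == true) = j := findIdx_true_eq rest j hjr hrestj hpre
        have hc : cores[j]? = some (cores.getD j 0) := by
          simp [List.getD, List.getElem?_eq_getElem hjN]
        cases fuelA with
        | zero =>
          exfalso
          have htm : true ∈ rest := by
            rw [List.getD, List.getElem?_eq_getElem hjr] at hrestj
            simp only [Option.getD_some] at hrestj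
            exact hrestj ▸ List.getElem_mem hjr
          have : 1 ≤ rest.count true := List.count_pos_iff.mpr htm
          omega
        | succ fu =>
          have hstep : innerA cores t (fu + 1) (n, heap, rest, last) =
              innerA cores t fu (n - 1, hpush (t + cores.getD j 0, j) heap,
                rest.set j false, some j) := by
            simp only [innerA, hfind, hc]
            rw [if_pos ⟨hn, hany⟩, if_neg (fun hcond' => hcond'.1 hany)]
          have hrl2 : (rest.set j false).length = cores.length := by simpa using hrl
          have hfl2 : (f.set j (t + cores.getD j 0)).length = cores.length := by simpa using hfl
          have hnodup2 : ((hpush (t + cores.getD j 0, j) heap).map Prod.snd).Nodup := by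
            have hperm := (hpush_perm (t + cores.getD j 0, j) heap).map Prod.snd
            apply hperm.nodup_iff.mpr
            refine List.nodup_cons.mpr ⟨?_, hnodup⟩
            intro hjmem
            rcases List.mem_map.mp hjmem with ⟨⟨e', i'⟩, hmem', hsnd⟩
            rcases hmem e' i' hmem' with ⟨_, _, hri'⟩
            rw [show i' = j from hsnd] at hri'
            rw [hrestj] at hri'
            exact absurd hri' (by simp)
          have hmem2 : ∀ e i, (e, i) ∈ hpush (t + cores.getD j 0, j) heap →
              i < cores.length ∧ e = (f.set j (t + cores.getD j 0)).getD i 0 ∧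
              (rest.set j false).getD i true = false := by
            intro e i hmem'
            rcases mem_hpush.mp hmem' with h | h
            · have h5 : i = j := congrArg Prod.snd h
              have h4 : e = t + cores.getD j 0 := congrArg Prod.fst h
              rw [h5, h4]
              exact ⟨hjN, (getD_set_self_int f j _ 0 (by rw [hfl]; exact hjN)).symm,
                getD_set_self rest j false true hjr⟩
            · rcases hmem e i h with ⟨h1, h2, h3⟩
              have hij : j ≠ i := by
                intro hji; subst hji
                rw [hrestj] at h3; exact absurd h3 (by simp)
              exact ⟨h1, by rwa [getD_set_ne_int _ _ _ _ _ hij],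
                by rwa [getD_set_ne _ _ _ _ _ hij]⟩
          have hbusy2 : ∀ i, i < cores.length → (rest.set j false).getD i true = false →
              ((f.set j (t + cores.getD j 0)).getD i 0, i) ∈
                hpush (t + cores.getD j 0, j) heap := by
            intro i hi hri
            by_cases hij : j = i
            · subst hij
              rw [getD_set_self_int f j _ 0 (by rw [hfl]; exact hjN)]
              exact mem_hpush.mpr (Or.inl rfl)
            · rw [getD_set_ne _ _ _ _ _ hij] at hri
              rw [getD_set_ne_int _ _ _ _ _ hij]
              exact mem_hpush.mpr (Or.inr (hbusy i hi hri))
          have hcnt2 : (rest.set j false).count true ≤ fu := by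
            have := count_set_true rest j hjr hrestj
            omega
          obtain ⟨n', heap', rest', f', last', hA, hB, hrel⟩ :=
            ih (j + 1) (n - 1) (hpush (t + cores.getD j 0, j) heap) (rest.set j false)
              (f.set j (t + cores.getD j 0)) (some j) fu (by omega) hrl2 hfl2
              (by
                intro i hi
                by_cases hij : j = i
                · subst hij; exact getD_set_self rest j false true hjr
                · rw [getD_set_ne _ _ _ _ _ hij]
                  exact hpre i (by omega))
              (by
                intro i hi hiN
                have hij : j ≠ i := by omega
                rw [getD_set_ne _ _ _ _ _ hij, getD_set_ne_int _ _ _ _ _ hij]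
                exact hsuf i (by omega) hiN)
              (hpush_pairwise _ _ hpair) hnodup2 hmem2 hbusy2 hcnt2
          refine ⟨n', heap', rest', f', last', hstep ▸ hA, ?_, hrel⟩
          simp only [forB]
          rw [if_pos ⟨hn, hfj⟩]
          exact hB
      · -- core j is busy: A's first free index is further right, B skips index j
        have hrestj : rest.getD j true = false := by
          rw [hsuf j le_rfl hjN]; exact decide_eq_false hfj
        obtain ⟨n', heap', rest', f', last', hA, hB, hrel⟩ :=
          ih (j + 1) n heap rest f last fuelA (by omega) hrl hfl
            (by
              intro i hi
              by_cases hij : i = j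
              · subst hij; exact hrestj
              · exact hpre i (by omega))
            (fun i hi hiN => hsuf i (by omega) hiN)
            hpair hnodup hmem hbusy hcnt
        refine ⟨n', heap', rest', f', last', hA, ?_, hrel⟩
        simp only [forB]
        rw [if_neg (fun h => hfj h.2)]
        exact hB
    · -- no tasks left: A's guard fails at once, B's remaining scan is a no-op
      have hA : innerA cores t fuelA (n, heap, rest, last) = some (n, heap, rest, last) := by
        cases fuelA with
        | zero => rfl
        | succ fu =>
          simp only [innerA]
          rw [if_neg (fun h => hn h.1)]
      refine ⟨n, heap, rest, f, last, hA, forB_nonpos cores t (k + 1) j n f last hn,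
        hrl, hfl, hpair, hnodup, hmem, hbusy, ?_⟩
      intro i hi hri
      by_cases hij : i < j
      · rw [hpre i hij] at hri
        exact absurd hri (by simp)
      · have hs := hsuf i (by omega) hi
        rw [hri] at hs
        have : f.getD i 0 ≤ t := of_decide_eq_true hs.symm
        omega

-- the two outer while-loops stay in lockstep
theorem outer_spec (cores : List Int) :
    ∀ (fuel : Nat) (n curr : Int) (heap : List (Int × Nat)) (rest : List Bool)
      (f : List Int) (last : Option Nat),
    SimRel cores curr heap rest f →
    outerA cores fuel (n, curr, heap, rest, last) =
      some (outerB cores fuel (n, curr, f, last)) := by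
  intro fuel
  induction fuel with
  | zero => intro n curr heap rest f last _; simp [outerA, outerB]
  | succ fu ih =>
    intro n curr heap rest f last hrel
    obtain ⟨hrl, hfl, hpair, hnodup, hmem, hbusy, hfree⟩ := hrel
    by_cases hn : 0 < n
    · have hps := pop_spec cores f curr heap rest hrl hpair hnodup hmem hbusy hfree
      rcases hpop : popA curr heap rest with ⟨h', r'⟩
      rw [hpop] at hps
      obtain ⟨hplen, hpdec, hppair, hpnodup, hpmem, hpbusy⟩ := hps
      obtain ⟨n', heap', rest', f', last', hA, hB, hrel'⟩ :=
        inner_spec cores curr cores.length 0 n h' r' f last r'.length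
          (by omega) hplen hfl (fun i hi => absurd hi (by omega))
          (fun i _ hiN => hpdec i hiN)
          hppair hpnodup hpmem hpbusy List.count_le_length
      simp only [outerA, outerB]
      rw [if_pos hn, if_pos hn, hpop]
      simp only [hA, hB]
      exact ih n' (curr + 1) heap' rest' f' last' hrel'
    · simp only [outerA, outerB]
      rw [if_neg hn, if_neg hn]

theorem rel_init (cores : List Int) :
    SimRel cores 0 [] (List.replicate cores.length true) (List.replicate cores.length 0) := by
  refine ⟨by simp, by simp, List.Pairwise.nil, by simp, by simp, ?_, ?_⟩
  · intro i hi h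
    rw [List.getD, List.getElem?_replicate, if_pos hi] at h
    simp at h
  · intro i hi _
    rw [List.getD, List.getElem?_replicate, if_pos hi]
    simp

-- ===== VERDICT (by name: the statement is the Claim_ definition above) =====
theorem solution_spec : Claim_equal_solution := by
  intro n cores _ _
  unfold Spec_solution solution solution_alt
  rw [outer_spec cores (pvFuel n cores) n 0 [] (List.replicate cores.length true)
    (List.replicate cores.length 0) none (rel_init cores)]
  cases outerB cores (pvFuel n cores) (n, 0, List.replicate cores.length 0, none) <;> simp
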